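-- pv_equiv track=rewrite | github.com/PeterBjuhr/shortscore | shortscore/shortScore.py | explodeChords
-- ===== SOURCE A (Python) =====
-- def explodeChords(music, nrOfParts):
--     parts = [''] * nrOfParts
--     start = 0
--     for n, t in enumerate(music):
--         if t == '<':
--             parts = [p + music[start:n] for p in parts]
--             start = n + 1
--         elif t == '>':
--             try:
--                 dura = music[n + 1:].split()[0]
--             except IndexError:
--                 dura = ''
--             if not dura.isdigit():
--                 dura = ''
--             for i, c in enumerate(reversed(music[start:n].split())):
--                 parts[i] += c + dura
--             start = n + 1 + len(dura)
--     return [p + music[start:] for p in parts]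
-- ===== SOURCE B (Python) =====
-- def explodeChords(music, nrOfParts):
--     # Two phases: tokenize the input into a list of events (plain text segments
--     # and chords with their duration), then render every event into the parts.
--     L = len(music)
--     events = []
--     start = 0
--     i = 0
--     while i < L:
--         t = music[i]
--         if t == '<':
--             events.append(('text', music[start:i]))
--             start = i + 1
--         elif t == '>':
--             j = i + 1
--             while j < L and music[j].isspace():
--                 j += 1
--             k = j
--             while k < L and not music[k].isspace():
--                 k += 1
--             dura = music[j:k] if music[j:k].isdigit() else ''
--             events.append(('chord', music[start:i].split()[::-1], dura))
--             start = i + 1 + len(dura)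
--         i += 1
--     events.append(('text', music[start:]))
--
--     parts = [''] * nrOfParts
--     for ev in events:
--         if ev[0] == 'text':
--             parts = [p + ev[1] for p in parts]
--         else:
--             _, notes, dura = ev
--             parts = [p + (notes[m] + dura if m < len(notes) else '')
--                      for m, p in enumerate(parts)]
--     return parts
-- ===== Notes on version B (the rewrite author's own statement) =====
-- stated objective: alternative
-- what changed: B is a two-phase pipeline: a tokenizer first turns the string into a list of events (text segments, and chords carrying their reversed note list and a duration read by an explicit whitespace/character scan instead of A's split() of the whole remaining string), and a separate renderer then folds the event list into the parts, distributing chord notes by indexed lookup into each part instead of A's in-place modification loop over the notes.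
import Mathlib
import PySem

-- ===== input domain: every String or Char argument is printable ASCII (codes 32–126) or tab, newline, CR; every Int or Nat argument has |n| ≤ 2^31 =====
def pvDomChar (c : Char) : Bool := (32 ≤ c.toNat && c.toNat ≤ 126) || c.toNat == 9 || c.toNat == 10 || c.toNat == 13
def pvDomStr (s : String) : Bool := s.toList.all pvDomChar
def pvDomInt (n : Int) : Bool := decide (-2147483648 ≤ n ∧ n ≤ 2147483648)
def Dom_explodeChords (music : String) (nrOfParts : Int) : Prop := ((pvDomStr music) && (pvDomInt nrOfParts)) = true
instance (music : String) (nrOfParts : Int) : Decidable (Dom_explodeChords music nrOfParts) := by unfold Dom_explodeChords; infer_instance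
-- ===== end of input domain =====

-- B restructures A's single stateful scan into a two-phase pipeline (tokenize into an event list,
-- then render the events into the parts), reading each duration by an explicit character scan.

-- ===== PORT A =====
-- loop body of A's 'for n, t in enumerate(music)' (state = (parts, start));
-- 'parts[i] += c + dura' raises IndexError for i out of range (excluded by Pre_); List.modify is a no-op there
def pvStepA (cs : List Char) (st : List (List Char) × Int) (p : Int × Char) : List (List Char) × Int :=
  if p.2 = '<' then
    (st.1.map (fun q => q ++ PySem.List.slice cs (some st.2) (some p.1)), p.1 + 1)
  else if p.2 = '>' then
    -- dura = music[n+1:].split()[0] (→ '' on IndexError); kept only if it .isdigit()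
    let dura0 := (PySem.Chars.split₀ (PySem.List.slice cs (some (p.1 + 1)) none)).headD []
    let dura := if PySem.Chars.strIsdigit dura0 then dura0 else []
    let notes := (PySem.Chars.split₀ (PySem.List.slice cs (some st.2) (some p.1))).reverse
    ((PySem.List.enumerate notes).foldl (fun ps q => ps.modify q.1.toNat (· ++ (q.2 ++ dura))) st.1,
     p.1 + 1 + (dura.length : Int))
  else st

def explodeChords (music : String) (nrOfParts : Int) : List String :=
  let cs := music.toList
  let res := (PySem.List.enumerate cs).foldl (pvStepA cs) (List.replicate nrOfParts.toNat [], (0 : Int))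
  res.1.map (fun pp => String.ofList (pp ++ PySem.List.slice cs (some res.2) none))

-- ===== PORT B =====
-- Source B phase 1 builds a list of events: plain text segments and chords (reversed note list + duration)
inductive PvEvent
  | text : List Char → PvEvent
  | chord : List (List Char) → List Char → PvEvent
deriving DecidableEq, Repr

-- Source B's tokenizing while-loop over the index i, as structural recursion on the remaining suffix;
-- the inner 'while … isspace' / 'while … not isspace' scans for music[j:k] are dropWhile/takeWhile on the suffix
def pvTok (cs : List Char) : List Char → Int → Int → List PvEvent
  | [], _, start => [PvEvent.text (PySem.List.slice cs (some start) none)]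
  | c :: rest, i, start =>
    if c = '<' then
      PvEvent.text (PySem.List.slice cs (some start) (some i)) :: pvTok cs rest (i + 1) (i + 1)
    else if c = '>' then
      let tok := (rest.dropWhile (fun c => PySem.Chars.isspace c)).takeWhile
        (fun c => !PySem.Chars.isspace c)
      let dura := if PySem.Chars.strIsdigit tok then tok else []
      PvEvent.chord ((PySem.Chars.split₀ (PySem.List.slice cs (some start) (some i))).reverse) dura
        :: pvTok cs rest (i + 1) (i + 1 + (dura.length : Int))
    else pvTok cs rest (i + 1) start

-- Source B phase 2: render each event into the parts ('notes[m] + dura if m < len(notes) else '''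
-- raises nothing in Python B; Python A raises IndexError for extra notes — excluded by Pre_)
def pvRender (parts : List (List Char)) : List PvEvent → List (List Char)
  | [] => parts
  | PvEvent.text s :: evs => pvRender (parts.map (· ++ s)) evs
  | PvEvent.chord notes dura :: evs =>
    pvRender (parts.mapIdx (fun m p =>
      p ++ (if m < notes.length then notes.getD m [] ++ dura else []))) evs

def explodeChords_alt (music : String) (nrOfParts : Int) : List String :=
  let cs := music.toList
  (pvRender (List.replicate nrOfParts.toNat []) (pvTok cs cs 0 0)).map String.ofList

-- ===== PRECONDITION & SPEC =====
-- Pre_ excludes exactly the inputs where some chord holds more notes than nrOfParts: there Python A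
-- raises IndexError ('parts[i] +='). The notes of the chord closed at a '>' are counted from a start
-- position fixed by the PREVIOUS delimiter alone ('<' at q starts at q+1; '>' at q starts at q+1
-- plus the length of its digit duration token, itself a function of q only), so the condition is a
-- pointwise check over adjacent delimiter pairs, with (-1, '<') standing before the first delimiter
-- (giving start 0).
def pvDuraLen (cs : List Char) (q : Int) : Int :=
  let d0 := (PySem.Chars.split₀ (PySem.List.slice cs (some (q + 1)) none)).headD []
  if PySem.Chars.strIsdigit d0 then (d0.length : Int) else 0

def pvChordStart (cs : List Char) (prev : Int × Char) : Int :=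
  if prev.2 = '<' then prev.1 + 1 else prev.1 + 1 + pvDuraLen cs prev.1

def Pre_explodeChords (music : String) (nrOfParts : Int) : Prop :=
  ∀ pr ∈ ((PySem.List.enumerate music.toList).filter (fun p => p.2 == '<' || p.2 == '>')).zip
      (((-1 : Int), '<') ::
        (PySem.List.enumerate music.toList).filter (fun p => p.2 == '<' || p.2 == '>')),
    pr.1.2 = '>' →
      (PySem.Chars.split₀ (PySem.List.slice music.toList
        (some (pvChordStart music.toList pr.2)) (some pr.1.1))).length ≤ nrOfParts.toNat
instance (music : String) (nrOfParts : Int) : Decidable (Pre_explodeChords music nrOfParts) := by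
  unfold Pre_explodeChords; infer_instance

def pvWitness_explodeChords : String × Int := ("a <b c>2 d", 2)

def Spec_explodeChords (music : String) (nrOfParts : Int) (out : List String) : Prop := out = explodeChords_alt music nrOfParts
instance (music : String) (nrOfParts : Int) (out : List String) : Decidable (Spec_explodeChords music nrOfParts out) := by unfold Spec_explodeChords; infer_instance

-- ===== CLAIM (what is proved, stated in full; the proofs are below) =====
def Claim_equal_explodeChords : Prop := ∀ (music : String) (nrOfParts : Int), Dom_explodeChords music nrOfParts → Pre_explodeChords music nrOfParts → Spec_explodeChords music nrOfParts (explodeChords music nrOfParts)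

-- ===== LEMMAS AND PROOFS =====

-- split₀.go with a non-empty accumulator prepends its reversal
theorem pvGoAcc : ∀ (s cur : List Char) (acc : List (List Char)),
    PySem.Chars.split₀.go s cur acc = acc.reverse ++ PySem.Chars.split₀.go s cur [] := by
  intro s
  induction s with
  | nil =>
    intro cur acc
    simp only [PySem.Chars.split₀.go]
    by_cases hc : cur.isEmpty
    · simp [hc]
    · simp [hc]
  | cons c rest ih =>
    intro cur acc
    simp only [PySem.Chars.split₀.go]
    by_cases hs : PySem.Chars.isspace c = true
    · rw [if_pos hs, if_pos hs]
      by_cases hc : cur.isEmpty = true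
      · rw [if_pos hc, if_pos hc]
        exact ih [] acc
      · rw [if_neg hc, if_neg hc]
        rw [ih [] (cur.reverse :: acc), ih [] [cur.reverse]]
        simp
    · rw [if_neg hs, if_neg hs]
      exact ih (c :: cur) acc

-- head of split₀.go when a token is already being read
theorem pvGoHead : ∀ (s cur : List Char), cur ≠ [] →
    (PySem.Chars.split₀.go s cur []).headD [] =
      cur.reverse ++ s.takeWhile (fun c => !PySem.Chars.isspace c) := by
  intro s
  induction s with
  | nil =>
    intro cur hc
    simp [PySem.Chars.split₀.go, List.isEmpty_iff, hc]
  | cons c rest ih =>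
    intro cur hc
    have hce : ¬ (cur.isEmpty = true) := by simp [List.isEmpty_iff, hc]
    simp only [PySem.Chars.split₀.go]
    by_cases hs : PySem.Chars.isspace c = true
    · rw [if_pos hs, if_neg hce, pvGoAcc rest [] [cur.reverse]]
      simp [hs]
    · rw [if_neg hs, ih (c :: cur) (by simp)]
      have hsb : PySem.Chars.isspace c = false := by
        exact Bool.not_eq_true _ ▸ (by simpa using hs)
      simp [hsb]

-- the first whitespace token of s (as A reads it via split()[0]) is what B's index scan reads
theorem pvSplitHead : ∀ (s : List Char),
    (PySem.Chars.split₀ s).headD [] =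
      (s.dropWhile (fun c => PySem.Chars.isspace c)).takeWhile (fun c => !PySem.Chars.isspace c) := by
  intro s
  induction s with
  | nil => rfl
  | cons c rest ih =>
    simp only [PySem.Chars.split₀, PySem.Chars.split₀.go] at ih ⊢
    by_cases hs : PySem.Chars.isspace c = true
    · rw [if_pos hs, if_pos (by rfl : ([] : List Char).isEmpty = true)]
      rw [List.dropWhile_cons, if_pos hs]
      exact ih
    · have hsb : PySem.Chars.isspace c = false := by
        exact Bool.not_eq_true _ ▸ (by simpa using hs)
      rw [if_neg hs, List.dropWhile_cons, if_neg hs]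
      rw [pvGoHead rest [c] (by simp)]
      simp [hsb]

-- A's modify-loop over the enumerated notes equals B's indexed-lookup rebuild (general start offset)
theorem pvDistrib (dura : List Char) :
    ∀ (notes : List (List Char)) (s : Nat) (parts : List (List Char)),
      (PySem.List.enumerate notes (s : Int)).foldl
          (fun ps q => ps.modify q.1.toNat (· ++ (q.2 ++ dura))) parts
        = parts.mapIdx (fun m p =>
            p ++ (if s ≤ m ∧ m < s + notes.length then notes.getD (m - s) [] ++ dura else [])) := by
  intro notes
  induction notes with
  | nil =>
    intro s parts
    apply List.ext_getElem
    · simp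
    · intro m h1 h2
      simp only [PySem.List.enumerate_nil, List.foldl_nil, List.getElem_mapIdx, List.length_nil]
      rw [if_neg (by omega)]
      simp
  | cons nt rest ih =>
    intro s parts
    have hcast : ((s : Int) + 1) = (((s + 1 : Nat)) : Int) := by push_cast; ring
    rw [PySem.List.enumerate_cons, List.foldl_cons, hcast, ih (s + 1)]
    apply List.ext_getElem
    · simp
    · intro m h1 h2
      simp only [List.getElem_mapIdx, List.getElem_modify, Int.toNat_natCast, List.length_cons]
      by_cases hm : m = s
      · subst hm
        rw [if_pos rfl, if_neg (by omega), if_pos (by omega), Nat.sub_self, List.getD_cons_zero]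
        simp
      · rw [if_neg (by omega : ¬ s = m)]
        by_cases hlo : s ≤ m
        · by_cases hhi : m < s + (rest.length + 1)
          · rw [if_pos (by omega), if_pos (by omega)]
            have hms : m - s = (m - (s + 1)) + 1 := by omega
            rw [hms, List.getD_cons_succ]
          · rw [if_neg (by omega), if_neg (by omega)]
        · rw [if_neg (by omega), if_neg (by omega)]

-- the s = 0 instance in the exact shape pvRender uses
theorem pvDistrib0 (dura : List Char) (notes parts : List (List Char)) :
    (PySem.List.enumerate notes).foldl
        (fun ps q => ps.modify q.1.toNat (· ++ (q.2 ++ dura))) parts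
      = parts.mapIdx (fun m p =>
          p ++ (if m < notes.length then notes.getD m [] ++ dura else [])) := by
  have h := pvDistrib dura notes 0 parts
  simp only [Nat.cast_zero] at h
  rw [h]
  apply List.ext_getElem
  · simp
  · intro m h1 h2
    simp only [List.getElem_mapIdx]
    congr 1
    by_cases hm : m < notes.length
    · rw [if_pos (by omega), if_pos hm]
      simp
    · rw [if_neg (by omega), if_neg hm]

-- main invariant: folding A's step over the enumerated suffix, then appending the tail slice,
-- is rendering B's token list of that suffix
theorem pvMain (cs : List Char) :
    ∀ (suf : List Char) (i start : Int) (parts : List (List Char)),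
      0 ≤ i → cs.drop i.toNat = suf →
      (let r := (PySem.List.enumerate suf i).foldl (pvStepA cs) (parts, start)
       r.1.map (· ++ PySem.List.slice cs (some r.2) none))
        = pvRender parts (pvTok cs suf i start) := by
  intro suf
  induction suf with
  | nil =>
    intro i start parts hi hdrop
    simp [PySem.List.enumerate_nil, pvTok, pvRender]
  | cons c rest ih =>
    intro i start parts hi hdrop
    have hrest : cs.drop (i + 1).toNat = rest := by
      have h1 : (i + 1).toNat = i.toNat + 1 := by omega
      rw [h1, ← List.drop_drop, hdrop]
      simp
    rw [PySem.List.enumerate_cons, List.foldl_cons]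
    by_cases h1 : c = '<'
    · subst h1
      simp only [pvStepA, pvTok, reduceIte]
      exact ih (i + 1) (i + 1) _ (by omega) hrest
    · by_cases h2 : c = '>'
      · subst h2
        simp only [pvStepA, pvTok, if_neg h1, reduceIte]
        have hsl : PySem.List.slice cs (some (i + 1)) none = rest := by
          rw [PySem.List.slice_from cs (by omega)]
          exact hrest
        rw [hsl, pvSplitHead rest]
        simp only [pvRender]
        rw [← pvDistrib0]
        exact ih (i + 1) _ _ (by omega) hrest
      · simp only [pvStepA, pvTok, if_neg h1, if_neg h2]
        exact ih (i + 1) start parts (by omega) hrest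

-- ===== VERDICT (by name: the statement is the Claim_ definition above) =====
theorem explodeChords_spec : Claim_equal_explodeChords := by
  intro music nrOfParts _ _
  unfold Spec_explodeChords explodeChords explodeChords_alt
  dsimp only
  rw [← pvMain music.toList music.toList 0 0 (List.replicate nrOfParts.toNat []) (by omega) (by simp)]
  simp [List.map_map, Function.comp]
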